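-- pv_equiv track=rewrite | github.com/ladonijaraze/goa_academy | level52/homework/work.py | reorder_words
-- ===== SOURCE A (Python) =====
-- def reorder_words(s):
--     words = s.split()
--     upper_words = []
--     lower_words = []
--
--     for word in words:
--         if word[0].isupper():
--             upper_words.append(word)
--         elif word[0].islower():
--             lower_words.append(word)
--
--     return ' '.join(upper_words + lower_words)
-- ===== SOURCE B (Python) =====
-- def reorder_words(s):
--     words = [w for w in s.split() if w[0].isupper() or w[0].islower()]
--     return ' '.join(sorted(words, key=lambda w: 0 if w[0].isupper() else 1))
-- ===== Notes on version B (the rewrite author's own statement) =====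
-- stated objective: alternative
-- what changed: Replaces A's explicit two-bucket partition loop with a filter of the valid words followed by a single stable sort on a 0/1 key (upper-first = 0), relying on sort stability to preserve within-group order.
import Mathlib
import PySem

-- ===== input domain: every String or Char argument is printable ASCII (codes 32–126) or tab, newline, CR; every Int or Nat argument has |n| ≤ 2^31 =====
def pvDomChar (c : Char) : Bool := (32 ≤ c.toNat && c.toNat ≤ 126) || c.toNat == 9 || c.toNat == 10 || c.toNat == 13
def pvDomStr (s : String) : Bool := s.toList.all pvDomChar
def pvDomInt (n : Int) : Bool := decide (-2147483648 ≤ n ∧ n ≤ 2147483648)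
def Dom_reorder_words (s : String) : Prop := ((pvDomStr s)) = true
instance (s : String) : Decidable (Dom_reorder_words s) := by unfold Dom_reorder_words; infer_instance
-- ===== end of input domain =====

-- B replaces A's explicit two-bucket partition loop with filter + one stable sort on a 0/1 key (objective: alternative, same behaviour).


-- ===== PORT A =====
def reorder_words (s : String) : String :=
  let words := PySem.Str.split₀ s
  let acc := words.foldl (fun (acc : List String × List String) word =>
    match PySem.Str.pyGet? word 0 with
    | none => acc          -- unreachable: split() produces only non-empty words
    | some c =>
      if PySem.Chars.isupper c then (acc.1 ++ [word], acc.2)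
      else if PySem.Chars.islower c then (acc.1, acc.2 ++ [word])
      else acc) ([], [])
  PySem.Str.join " " (acc.1 ++ acc.2)

-- ===== PORT B =====
-- Source B's filter predicate: w[0].isupper() or w[0].islower()  (w[0] never raises: split words are non-empty)
def pvFirstOk (w : String) : Bool :=
  match PySem.Str.pyGet? w 0 with
  | some c => PySem.Chars.isupper c || PySem.Chars.islower c
  | none => false

-- Source B's sort key: lambda w: 0 if w[0].isupper() else 1
def pvKey (w : String) : Int :=
  match PySem.Str.pyGet? w 0 with
  | some c => if PySem.Chars.isupper c then 0 else 1
  | none => 1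

def reorder_words_alt (s : String) : String :=
  let words := (PySem.Str.split₀ s).filter pvFirstOk
  PySem.Str.join " " (PySem.List.sorted words pvKey false)

-- ===== PRECONDITION & SPEC =====
def Spec_reorder_words (s : String) (out : String) : Prop := out = reorder_words_alt s
instance (s : String) (out : String) : Decidable (Spec_reorder_words s out) := by unfold Spec_reorder_words; infer_instance

-- ===== CLAIM (what is proved, stated in full; the proofs are below) =====
def Claim_equal_reorder_words : Prop := ∀ (s : String), Dom_reorder_words s → Spec_reorder_words s (reorder_words s)

-- ===== LEMMAS AND PROOFS =====

-- first character is uppercase (A's first branch)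
def pvUp (w : String) : Bool :=
  match PySem.Str.pyGet? w 0 with
  | some c => PySem.Chars.isupper c
  | none => false

-- first character is lowercase and not uppercase (A's elif branch)
def pvLow (w : String) : Bool :=
  match PySem.Str.pyGet? w 0 with
  | some c => !PySem.Chars.isupper c && PySem.Chars.islower c
  | none => false

theorem pvKey_of_up {w : String} (h : pvUp w = true) : pvKey w = 0 := by
  unfold pvUp at h; unfold pvKey
  cases hg : PySem.Str.pyGet? w 0 with
  | none => rw [hg] at h; simp at h
  | some c => rw [hg] at h; simp [h]

theorem pvKey_of_not_up {w : String} (h : pvUp w = false) : pvKey w = 1 := by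
  unfold pvUp at h; unfold pvKey
  cases hg : PySem.Str.pyGet? w 0 with
  | none => simp
  | some c => rw [hg] at h; simp [h]

theorem pvKey_le_one (w : String) : pvKey w ≤ 1 := by
  unfold pvKey; cases PySem.Str.pyGet? w 0 with
  | none => simp
  | some c => by_cases h : PySem.Chars.isupper c = true <;> simp [h]

-- a word kept by B's filter is in exactly one of A's buckets
theorem pvFirstOk_iff (w : String) : pvFirstOk w = (pvUp w || pvLow w) := by
  unfold pvFirstOk pvUp pvLow
  cases PySem.Str.pyGet? w 0 with
  | none => rfl
  | some c =>
    by_cases h : PySem.Chars.isupper c = true <;>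
      by_cases h2 : PySem.Chars.islower c = true <;> simp [h, h2]

-- the comparison Source B's insertion sort uses
def pvBefore (a b : String) : Bool := decide (pvKey a < pvKey b)

theorem pvBefore_of_not_up {x : String} (h : pvUp x = false) (y : String) :
    pvBefore x y = false := by
  unfold pvBefore
  have := pvKey_of_not_up h
  have := pvKey_le_one y
  simp; omega

theorem insertBy_append_left (x : String) (U L : List String)
    (hU : ∀ u ∈ U, pvBefore x u = false) :
    PySem.List.insertBy pvBefore x (U ++ L) = U ++ PySem.List.insertBy pvBefore x L := by
  induction U with
  | nil => simp
  | cons u U ih =>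
    have h0 : pvBefore x u = false := hU u (by simp)
    simp [PySem.List.insertBy, h0]
    exact ih (fun u hu => hU u (by simp [hu]))

-- inserting an upper-first word goes right between the two groups
theorem insertBy_up (x : String) (U L : List String)
    (hx : pvUp x = true)
    (hU : ∀ u ∈ U, pvUp u = true)
    (hL : ∀ l ∈ L, pvUp l = false) :
    PySem.List.insertBy pvBefore x (U ++ L) = U ++ x :: L := by
  have hUb : ∀ u ∈ U, pvBefore x u = false := by
    intro u hu
    unfold pvBefore
    have := pvKey_of_up hx
    have := pvKey_of_up (hU u hu)
    simp; omega
  rw [insertBy_append_left x U L hUb]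
  cases L with
  | nil => rfl
  | cons z L' =>
    have hz : pvBefore x z = true := by
      unfold pvBefore
      have := pvKey_of_up hx
      have := pvKey_of_not_up (hL z (by simp))
      simp; omega
    simp [PySem.List.insertBy, hz]

-- inserting a lower-first word goes to the end
theorem insertBy_low (x : String) (ys : List String) (hx : pvUp x = false) :
    PySem.List.insertBy pvBefore x ys = ys ++ [x] :=
  PySem.List.insertBy_of_forall_not_before pvBefore x ys
    (fun y _ => pvBefore_of_not_up hx y)

-- the stable sort of the filtered words is exactly the two-bucket partition
theorem foldl_insertBy_partition (ws : List String) : ∀ (U L : List String),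
    (∀ u ∈ U, pvUp u = true) → (∀ l ∈ L, pvUp l = false) →
    (ws.filter pvFirstOk).foldl (fun acc x => PySem.List.insertBy pvBefore x acc) (U ++ L)
      = (U ++ ws.filter pvUp) ++ (L ++ ws.filter pvLow) := by
  induction ws with
  | nil => intro U L _ _; simp
  | cons w ws ih =>
    intro U L hU hL
    by_cases hok : pvFirstOk w = true
    · have hok' := pvFirstOk_iff w
      by_cases hup : pvUp w = true
      · have hlow : pvLow w = false := by
          unfold pvUp at hup; unfold pvLow
          cases hg : PySem.Str.pyGet? w 0 with
          | none => rfl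
          | some c => rw [hg] at hup; simp [hup]
        rw [List.filter_cons_of_pos hok, List.filter_cons_of_pos hup,
            List.filter_cons_of_neg (by simp [hlow])]
        show ((w :: ws.filter pvFirstOk).foldl _ (U ++ L)) = _
        rw [List.foldl_cons, insertBy_up w U L hup hU hL]
        have : U ++ w :: L = (U ++ [w]) ++ L := by simp
        rw [this, ih (U ++ [w]) L
          (by intro u hu; rcases List.mem_append.mp hu with h | h
              · exact hU u h
              · simp at h; subst h; exact hup) hL]
        simp
      · have hup' : pvUp w = false := by simpa using hup
        have hlow : pvLow w = true := by
          rw [pvFirstOk_iff] at hok; simp [hup'] at hok; exact hok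
        rw [List.filter_cons_of_pos hok, List.filter_cons_of_neg (by simp [hup']),
            List.filter_cons_of_pos hlow]
        show ((w :: ws.filter pvFirstOk).foldl _ (U ++ L)) = _
        rw [List.foldl_cons, insertBy_low w (U ++ L) hup', List.append_assoc]
        rw [ih U (L ++ [w]) hU
          (by intro l hl; rcases List.mem_append.mp hl with h | h
              · exact hL l h
              · simp at h; subst h; exact hup')]
        simp
    · have hok' : pvFirstOk w = false := by simpa using hok
      have hboth := hok'
      rw [pvFirstOk_iff] at hboth
      have hup : pvUp w = false := (Bool.or_eq_false_iff.mp hboth).1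
      have hlow : pvLow w = false := (Bool.or_eq_false_iff.mp hboth).2
      rw [List.filter_cons_of_neg (by simp [hok']),
          List.filter_cons_of_neg (by simp [hup]),
          List.filter_cons_of_neg (by simp [hlow])]
      exact ih U L hU hL

-- A's loop is the pair of filters
theorem loopA_eq_filters (ws : List String) : ∀ (u l : List String),
    ws.foldl (fun (acc : List String × List String) word =>
      match PySem.Str.pyGet? word 0 with
      | none => acc
      | some c =>
        if PySem.Chars.isupper c then (acc.1 ++ [word], acc.2)
        else if PySem.Chars.islower c then (acc.1, acc.2 ++ [word])
        else acc) (u, l)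
      = (u ++ ws.filter pvUp, l ++ ws.filter pvLow) := by
  induction ws with
  | nil => intro u l; simp
  | cons w ws ih =>
    intro u l
    rw [List.foldl_cons]
    cases hg : PySem.Str.pyGet? w 0 with
    | none =>
      have hup : pvUp w = false := by unfold pvUp; rw [hg]
      have hlow : pvLow w = false := by unfold pvLow; rw [hg]
      simp only []
      rw [ih u l, List.filter_cons_of_neg (by simp [hup]),
          List.filter_cons_of_neg (by simp [hlow])]
    | some c =>
      by_cases hc : PySem.Chars.isupper c = true
      · have hup : pvUp w = true := by unfold pvUp; rw [hg]; exact hc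
        have hlow : pvLow w = false := by unfold pvLow; rw [hg]; simp [hc]
        simp only [hc, if_true]
        rw [ih (u ++ [w]) l, List.filter_cons_of_pos hup,
            List.filter_cons_of_neg (by simp [hlow])]
        simp
      · have hc' : PySem.Chars.isupper c = false := by simpa using hc
        by_cases hl : PySem.Chars.islower c = true
        · have hup : pvUp w = false := by unfold pvUp; rw [hg]; exact hc'
          have hlow : pvLow w = true := by unfold pvLow; rw [hg]; simp [hc', hl]
          simp only [hc', hl, Bool.false_eq_true, if_false, if_true]
          rw [ih u (l ++ [w]), List.filter_cons_of_neg (by simp [hup]),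
              List.filter_cons_of_pos hlow]
          simp
        · have hl' : PySem.Chars.islower c = false := by simpa using hl
          have hup : pvUp w = false := by unfold pvUp; rw [hg]; exact hc'
          have hlow : pvLow w = false := by unfold pvLow; rw [hg]; simp [hc']; simpa using hl
          simp only [hc', hl', Bool.false_eq_true, if_false]
          rw [ih u l, List.filter_cons_of_neg (by simp [hup]),
              List.filter_cons_of_neg (by simp [hlow])]

-- ===== VERDICT (by name: the statement is the Claim_ definition above) =====
theorem reorder_words_spec : Claim_equal_reorder_words := by
  intro s _
  unfold Spec_reorder_words reorder_words reorder_words_alt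
  have hsorted :
      PySem.List.sorted ((PySem.Str.split₀ s).filter pvFirstOk) pvKey false
        = (PySem.Str.split₀ s).filter pvUp ++ (PySem.Str.split₀ s).filter pvLow := by
    rw [PySem.List.sorted_eq_foldl_insertBy]
    have h := foldl_insertBy_partition (PySem.Str.split₀ s) [] []
      (by intro u hu; simp at hu) (by intro l hl; simp at hl)
    simpa [pvBefore] using h
  simp only [hsorted, loopA_eq_filters]
  simp
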